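-- pv_equiv track=rewrite | github.com/raeez/chiral-bar-cobar | compute/lib/bc_crystalline_shadow_cohomology_engine.py | affine_conic_point_count
-- ===== SOURCE A (Python) =====
-- def legendre_symbol(a: int, p: int) -> int:
--     r"""Legendre symbol (a/p) for odd prime p.
--
--     Returns +1 if a is a QR mod p, -1 if NQR, 0 if p | a.
--     """
--     if p == 2:
--         return a % 2  # not standard but handle gracefully
--     a = a % p
--     if a == 0:
--         return 0
--     # Euler criterion: a^((p-1)/2) mod p
--     val = pow(a, (p - 1) // 2, p)
--     if val == p - 1:
--         return -1
--     return val  # 0 or 1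
--
-- def affine_conic_point_count(q0: int, q1: int, q2: int, p: int) -> int:
--     r"""Count F_p-points on the affine conic w^2 = q0 + q1*t + q2*t^2 over F_p.
--
--     Enumerate all t in F_p, for each count solutions w in F_p of w^2 = f(t).
--
--     #X(F_p) = sum_{t=0}^{p-1} (1 + (f(t)/p))
--     where (f(t)/p) is the Legendre symbol (0 if f(t)=0 mod p, giving w=0 only once
--     but we want w^2 = f(t) so w = 0 is one solution, and nonzero square roots come
--     in pairs).
--
--     More precisely:
--     - If f(t) = 0 mod p: 1 solution (w = 0)
--     - If f(t) is a nonzero QR mod p: 2 solutions (w = +/- sqrt)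
--     - If f(t) is a NQR mod p: 0 solutions
--     """
--     count = 0
--     for t in range(p):
--         ft = (q0 + q1 * t + q2 * t * t) % p
--         if ft < 0:
--             ft = ft % p
--         ls = legendre_symbol(ft, p)
--         if ls == 1:
--             count += 2  # two square roots
--         elif ls == 0:
--             count += 1  # w = 0 only
--         # else ls == -1: no solutions
--     return count
-- ===== SOURCE B (Python) =====
-- def affine_conic_point_count(q0: int, q1: int, q2: int, p: int) -> int:
--     """Two-pass re-implementation: bucket the residues f(t) mod p with a counter
--     first, then run the Euler-criterion test once per DISTINCT residue and add
--     its weight multiplied by the bucket size (A re-runs the modular power for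
--     every t)."""
--     if p <= 0:
--         return 0
--     freq = {}
--     for t in range(p):
--         ft = (q0 + q1 * t + q2 * t * t) % p
--         freq[ft] = freq.get(ft, 0) + 1
--     e = (p - 1) // 2
--     total = 0
--     for r, c in freq.items():
--         if p == 2:
--             v = r % 2
--         elif r == 0:
--             v = 0
--         else:
--             v = pow(r, e, p)
--         if v == 1:
--             total += 2 * c
--         elif v == 0:
--             total += c
--     return total
-- ===== Notes on version B (the rewrite author's own statement) =====
-- stated objective: faster
-- what changed: B buckets the residues f(t) mod p into a counter in one pass and runs the Euler-criterion modular power once per distinct residue (about p/2 of them, and O(1) in degenerate cases) instead of once per t as A does.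
import Mathlib
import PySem

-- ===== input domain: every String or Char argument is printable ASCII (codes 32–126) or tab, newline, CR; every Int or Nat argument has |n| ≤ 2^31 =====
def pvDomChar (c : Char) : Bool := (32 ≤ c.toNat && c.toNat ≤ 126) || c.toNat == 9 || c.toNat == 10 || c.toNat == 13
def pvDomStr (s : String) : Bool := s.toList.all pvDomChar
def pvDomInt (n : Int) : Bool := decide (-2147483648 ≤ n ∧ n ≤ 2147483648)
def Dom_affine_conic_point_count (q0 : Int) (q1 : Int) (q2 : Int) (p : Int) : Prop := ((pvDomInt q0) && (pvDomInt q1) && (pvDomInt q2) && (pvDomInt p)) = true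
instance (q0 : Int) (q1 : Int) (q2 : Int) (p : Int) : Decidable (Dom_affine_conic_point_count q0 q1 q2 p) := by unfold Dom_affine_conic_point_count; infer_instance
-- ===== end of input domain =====

-- B replaces A's per-t Euler-criterion modular power by a counter over the distinct
-- residues f(t) mod p, running the modular power once per distinct residue (measured faster).

-- ===== PORT A =====
-- Exponent (p-1)//2 is ≥ 0 at every call site of legendre_symbol in A (p ranges over 1..,
-- and p = 2 is handled before), so '.toNat' on it is exact there.
def legendre_symbol (a : Int) (p : Int) : Int :=
  if p = 2 then PySem.Int.mod a 2
  else
    let a1 := PySem.Int.mod a p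
    if a1 = 0 then 0
    else
      let val := PySem.Int.powMod a1 (PySem.Int.floordiv (p - 1) 2).toNat p
      if val = p - 1 then -1 else val

def affine_conic_point_count (q0 : Int) (q1 : Int) (q2 : Int) (p : Int) : Int :=
  (PySem.List.pyRange 0 p 1).foldl
    (fun count t =>
      let ft := PySem.Int.mod (q0 + q1 * t + q2 * t * t) p
      let ft2 := if ft < 0 then PySem.Int.mod ft p else ft
      let ls := legendre_symbol ft2 p
      if ls = 1 then count + 2 else if ls = 0 then count + 1 else count)
    0

-- ===== PORT B =====
-- 'e' is ≥ 0 whenever the pow branch runs (p ≥ 1 there), so '.toNat' is exact.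
def affine_conic_point_count_alt (q0 : Int) (q1 : Int) (q2 : Int) (p : Int) : Int :=
  if p ≤ 0 then 0
  else
    let freq := (PySem.List.pyRange 0 p 1).foldl
      (fun d t =>
        let ft := PySem.Int.mod (q0 + q1 * t + q2 * t * t) p
        d.insert ft (d.getD ft 0 + 1))
      PySem.Dict.empty
    let e := PySem.Int.floordiv (p - 1) 2
    freq.items.foldl
      (fun total rc =>
        let v := if p = 2 then PySem.Int.mod rc.1 2
                 else if rc.1 = 0 then (0 : Int)
                 else PySem.Int.powMod rc.1 e.toNat p
        if v = 1 then total + 2 * rc.2 else if v = 0 then total + rc.2 else total)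
      0

-- ===== PRECONDITION & SPEC =====
def Spec_affine_conic_point_count (q0 : Int) (q1 : Int) (q2 : Int) (p : Int) (out : Int) : Prop := out = affine_conic_point_count_alt q0 q1 q2 p
instance (q0 : Int) (q1 : Int) (q2 : Int) (p : Int) (out : Int) : Decidable (Spec_affine_conic_point_count q0 q1 q2 p out) := by unfold Spec_affine_conic_point_count; infer_instance

-- ===== CLAIM (what is proved, stated in full; the proofs are below) =====
def Claim_equal_affine_conic_point_count : Prop := ∀ (q0 : Int) (q1 : Int) (q2 : Int) (p : Int), Dom_affine_conic_point_count q0 q1 q2 p → Spec_affine_conic_point_count q0 q1 q2 p (affine_conic_point_count q0 q1 q2 p)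

-- ===== LEMMAS AND PROOFS =====

-- the residue f(t) = (q0 + q1*t + q2*t^2) mod p both programs bucket by
def pvF (q0 q1 q2 p t : Int) : Int := PySem.Int.mod (q0 + q1 * t + q2 * t * t) p

-- per-residue weight as A computes it (via legendre_symbol)
def pvWgtA (p r : Int) : Int :=
  if legendre_symbol r p = 1 then 2 else if legendre_symbol r p = 0 then 1 else 0

-- per-residue weight as B computes it (inline Euler criterion)
def pvWgtB (p r : Int) : Int :=
  let v := if p = 2 then PySem.Int.mod r 2
           else if r = 0 then (0 : Int)
           else PySem.Int.powMod r (PySem.Int.floordiv (p - 1) 2).toNat p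
  if v = 1 then 2 else if v = 0 then 1 else 0

lemma pvWgt_eq (p r : Int) (h0 : 0 ≤ r) (hlt : r < p) : pvWgtA p r = pvWgtB p r := by
  unfold pvWgtA pvWgtB legendre_symbol
  by_cases h2 : p = 2
  · simp [h2]
  · have hp : 0 < p := lt_of_le_of_lt h0 hlt
    have hmod : PySem.Int.mod r p = r := by
      rw [PySem.Int.mod_eq_emod_of_pos hp, Int.emod_eq_of_lt h0 hlt]
    simp only [h2, if_false, hmod]
    by_cases hr : r = 0
    · simp [hr]
    · have hp2 : 2 ≤ p := by omega
      have hp3 : 3 ≤ p := by omega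
      simp only [hr, if_false]
      set val := PySem.Int.powMod r (PySem.Int.floordiv (p - 1) 2).toNat p with hval
      by_cases hv : val = p - 1
      · have h1 : val ≠ 1 := by omega
        have h0' : val ≠ 0 := by omega
        simp [hv]
        omega
      · simp [hv]

-- A as a plain sum of weights over the residues of range(p)
lemma A_eq_sum (q0 q1 q2 p : Int) (hp : 0 < p) :
    affine_conic_point_count q0 q1 q2 p
      = ((PySem.List.pyRange 0 p 1).map (fun t => pvWgtA p (pvF q0 q1 q2 p t))).sum := by
  unfold affine_conic_point_count
  have hstep : (fun (count t : Int) =>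
      let ft := PySem.Int.mod (q0 + q1 * t + q2 * t * t) p
      let ft2 := if ft < 0 then PySem.Int.mod ft p else ft
      let ls := legendre_symbol ft2 p
      if ls = 1 then count + 2 else if ls = 0 then count + 1 else count)
      = fun count t => count + pvWgtA p (pvF q0 q1 q2 p t) := by
    funext count t
    have hnn := PySem.Int.mod_nonneg (q0 + q1 * t + q2 * t * t) hp
    simp only [pvWgtA, pvF, if_neg (not_lt.mpr hnn)]
    split_ifs <;> ring
  rw [hstep, PySem.List.foldl_add, zero_add]

-- the counted sum over the distinct residues equals the plain sum
lemma sum_count (rs : List Int) (w : Int → Int) :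
    ((PySem.Set.ofList rs).map (fun k => ((rs.count k : Int)) * w k)).sum
      = (rs.map w).sum := by
  rw [← List.sum_toFinset _ (PySem.Set.nodup_ofList rs)]
  have hfs : (PySem.Set.ofList rs).toFinset = rs.toFinset := by
    ext x; simp [PySem.Set.mem_ofList]
  rw [hfs]
  have h := Finset.sum_multiset_map_count (↑rs : Multiset Int) w
  simpa [nsmul_eq_mul] using h.symm

-- B as the counted sum of its weights over the distinct residues
lemma B_eq_sum (q0 q1 q2 p : Int) (hp : 0 < p) :
    affine_conic_point_count_alt q0 q1 q2 p
      = ((PySem.List.pyRange 0 p 1).map (fun t => pvWgtB p (pvF q0 q1 q2 p t))).sum := by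
  unfold affine_conic_point_count_alt
  rw [if_neg (by omega)]
  dsimp only
  have hfreq : (PySem.List.pyRange 0 p 1).foldl
      (fun d t =>
        let ft := PySem.Int.mod (q0 + q1 * t + q2 * t * t) p
        d.insert ft (d.getD ft 0 + 1))
      PySem.Dict.empty
      = PySem.Dict.counter ((PySem.List.pyRange 0 p 1).map (pvF q0 q1 q2 p)) := by
    rw [← PySem.Dict.foldl_insert_getD_add_one_eq_counter, List.foldl_map]
    rfl
  rw [hfreq, PySem.Dict.items_counter]
  set rs := (PySem.List.pyRange 0 p 1).map (pvF q0 q1 q2 p) with hrs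
  have hstep : (fun (total : Int) (rc : Int × Int) =>
      let v := if p = 2 then PySem.Int.mod rc.1 2
               else if rc.1 = 0 then (0 : Int)
               else PySem.Int.powMod rc.1 (PySem.Int.floordiv (p - 1) 2).toNat p
      if v = 1 then total + 2 * rc.2 else if v = 0 then total + rc.2 else total)
      = fun total rc => total + rc.2 * pvWgtB p rc.1 := by
    funext total rc
    simp only [pvWgtB]
    split_ifs <;> ring
  rw [hstep, PySem.List.foldl_add, zero_add, List.map_map]
  have : ((fun rc : Int × Int => rc.2 * pvWgtB p rc.1) ∘ fun k => (k, (rs.count k : Int)))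
      = fun k => (rs.count k : Int) * pvWgtB p k := rfl
  rw [this, sum_count rs (pvWgtB p), hrs, List.map_map]
  rfl

-- ===== VERDICT (by name: the statement is the Claim_ definition above) =====
theorem affine_conic_point_count_spec : Claim_equal_affine_conic_point_count := by
  intro q0 q1 q2 p _
  unfold Spec_affine_conic_point_count
  by_cases hp : 0 < p
  · rw [A_eq_sum q0 q1 q2 p hp, B_eq_sum q0 q1 q2 p hp]
    congr 1
    apply List.map_congr_left
    intro t _
    exact pvWgt_eq p (pvF q0 q1 q2 p t)
      (PySem.Int.mod_nonneg _ hp) (PySem.Int.mod_lt _ hp)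
  · have hnil : PySem.List.pyRange 0 p 1 = [] := by
      rw [List.eq_nil_iff_forall_not_mem]
      intro x hx
      rw [PySem.List.mem_pyRange_one] at hx
      omega
    unfold affine_conic_point_count affine_conic_point_count_alt
    rw [hnil, if_pos (by omega)]
    rfl
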